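-- pv_equiv track=rewrite | github.com/nicoleineza/python-practice-codes | strings.f.py | first_vowel_index
-- ===== SOURCE A (Python) =====
-- def is_vowel(astring):
--     if astring==("a"or"A") or astring==("e" or "E") or astring==("i" or "I") or astring==("o" or "O") or astring==("u" or "U"):
--
--         return(True)
--     else:
--         return(False)
--
-- def first_vowel_index(astring):
--     index=0
--     while index < len(astring):
--         my_char=astring[index]
--
--         vowel_=is_vowel(my_char)
--         if vowel_== True:
--             vowel_index=(astring.index(my_char))
--
--             #print (vowel_index)
--             return (vowel_index)
--
--         elif vowel_!=True and index<len(astring):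
--             index=index+1
--
--         else:
--             return(-1)
-- ===== SOURCE B (Python) =====
-- def first_vowel_index(astring):
--     positions = [p for p in (astring.find(v) for v in "aeiou") if p != -1]
--     return min(positions) if positions else None
-- ===== Notes on version B (the rewrite author's own statement) =====
-- stated objective: idiomatic
-- what changed: Replaces the character-by-character while loop (with its per-hit str.index rescan and unreachable -1 branch) by five str.find calls, one per lowercase vowel, aggregated with min over the hits.
import Mathlib
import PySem

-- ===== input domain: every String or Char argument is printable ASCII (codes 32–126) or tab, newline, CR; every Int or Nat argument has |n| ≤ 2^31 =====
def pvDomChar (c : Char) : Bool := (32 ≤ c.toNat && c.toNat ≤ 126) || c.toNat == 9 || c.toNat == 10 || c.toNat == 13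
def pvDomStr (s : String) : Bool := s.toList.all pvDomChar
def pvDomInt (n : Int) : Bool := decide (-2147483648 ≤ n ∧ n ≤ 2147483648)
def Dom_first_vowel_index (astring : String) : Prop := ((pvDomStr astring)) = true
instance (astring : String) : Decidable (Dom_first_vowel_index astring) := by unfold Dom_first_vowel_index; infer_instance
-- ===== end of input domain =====

-- B replaces A's character-by-character while loop by one str.find per lowercase vowel aggregated with min (idiomatic; same asymptotic cost).

-- ===== PORT A =====
-- helper is_vowel: A's '("a" or "A")' etc. evaluate to the lowercase literal, so only lowercase vowels match
def pvIsVowelA (c : Char) : Bool :=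
  c == 'a' || c == 'e' || c == 'i' || c == 'o' || c == 'u'

-- the while loop of A: scan by index; on a vowel return astring.index(my_char)
def pvLoopA (cs : List Char) (index : Nat) : Option Int :=
  if h : index < cs.length then
    let my_char := cs[index]
    if pvIsVowelA my_char = true then
      some (PySem.Chars.find cs [my_char])   -- astring.index(my_char); the char is present, so index = find
    else
      pvLoopA cs (index + 1)
  else none
termination_by cs.length - index

def first_vowel_index (astring : String) : Option Int :=
  pvLoopA astring.toList 0

-- ===== PORT B =====
def first_vowel_index_alt (astring : String) : Option Int :=
  let positions :=
    ((['a', 'e', 'i', 'o', 'u'].map (fun v => PySem.Chars.find astring.toList [v])).filter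
      (fun p => p ≠ -1))
  if positions = [] then none else PySem.List.min? positions (fun x => x)

-- ===== PRECONDITION & SPEC =====
def Spec_first_vowel_index (astring : String) (out : Option Int) : Prop := out = first_vowel_index_alt astring
instance (astring : String) (out : Option Int) : Decidable (Spec_first_vowel_index astring out) := by unfold Spec_first_vowel_index; infer_instance

-- ===== CLAIM (what is proved, stated in full; the proofs are below) =====
def Claim_equal_first_vowel_index : Prop := ∀ (astring : String), Dom_first_vowel_index astring → Spec_first_vowel_index astring (first_vowel_index astring)

-- ===== LEMMAS AND PROOFS =====

-- [c] is a prefix of l iff l starts with c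
theorem pv_singleton_prefix (c : Char) (l : List Char) : ([c] <+: l) ↔ l.head? = some c := by
  cases l with
  | nil => simp
  | cons h t =>
    constructor
    · rintro ⟨r, hr⟩
      injection hr with h1 _
      simp [h1]
    · intro hh
      simp only [List.head?_cons, Option.some.injEq] at hh
      exact ⟨t, by rw [hh]; rfl⟩

-- find of a single char at its first occurrence
theorem pv_find_single (cs : List Char) (c : Char) (i : Nat)
    (hi : cs[i]? = some c) (hmin : ∀ j < i, cs[j]? ≠ some c) :
    PySem.Chars.find cs [c] = (i : Int) := by
  have hmem : c ∈ cs := List.mem_of_getElem? hi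
  have hinf : [c] <:+: cs := (List.singleton_infix_iff c cs).mpr hmem
  have h0 : 0 ≤ PySem.Chars.find cs [c] := (PySem.Chars.find_nonneg_iff cs [c]).mpr hinf
  obtain ⟨hpre, hfirst⟩ := PySem.Chars.find_spec h0
  rw [pv_singleton_prefix, List.head?_drop] at hpre
  have hle : (PySem.Chars.find cs [c]).toNat ≤ i := by
    by_contra hgt
    exact hfirst i (by omega) ((pv_singleton_prefix c _).mpr (by rw [List.head?_drop]; exact hi))
  have hge : i ≤ (PySem.Chars.find cs [c]).toNat := by
    by_contra hlt
    exact hmin _ (by omega) hpre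
  omega

-- find of an absent char
theorem pv_find_absent (cs : List Char) (c : Char) (h : c ∉ cs) :
    PySem.Chars.find cs [c] = -1 :=
  (PySem.Chars.find_eq_neg_one_iff cs [c]).mpr
    (fun hinf => h ((List.singleton_infix_iff c cs).mp hinf))

-- a char is a vowel iff it is in the literal list
theorem pv_vowel_mem (c : Char) : pvIsVowelA c = true ↔ c ∈ ['a', 'e', 'i', 'o', 'u'] := by
  simp [pvIsVowelA]
  tauto

-- the common specification: index of the first vowel via findIdx?
def pvSpec (cs : List Char) : Option Int :=
  (cs.findIdx? pvIsVowelA).map (fun k => (k : Int))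

-- A's loop computes pvSpec (invariant: no vowel before index)
theorem pv_loopA_spec (cs : List Char) (index : Nat)
    (hpre : ∀ j < index, ∀ hj : j < cs.length, pvIsVowelA cs[j] = false) :
    pvLoopA cs index = pvSpec cs := by
  unfold pvLoopA
  by_cases h : index < cs.length
  · rw [dif_pos h]
    by_cases hv : pvIsVowelA cs[index] = true
    · rw [if_pos hv]
      have hfind : PySem.Chars.find cs [cs[index]] = (index : Int) := by
        apply pv_find_single cs cs[index] index (by simp [h])
        intro j hj hc
        have hjl : j < cs.length := by omega
        have hf := hpre j hj hjl
        rw [List.getElem?_eq_getElem hjl] at hc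
        injection hc with hc'
        rw [hc'] at hf
        simp [hf] at hv
      have hidx : cs.findIdx? pvIsVowelA = some index := by
        rw [List.findIdx?_eq_some_iff_getElem]
        exact ⟨h, hv, fun j hj => by simp [hpre j hj (by omega)]⟩
      simp [pvSpec, hidx, hfind]
    · rw [if_neg hv]
      exact pv_loopA_spec cs (index + 1) (by
        intro j hj hjl
        by_cases hji : j < index
        · exact hpre j hji hjl
        · have : j = index := by omega
          subst this
          simpa using hv)
  · rw [dif_neg h]
    have hnone : cs.findIdx? pvIsVowelA = none := by
      rw [List.findIdx?_eq_none_iff]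
      intro x hx
      obtain ⟨j, hj, rfl⟩ := List.mem_iff_getElem.mp hx
      exact hpre j (by omega) hj
    simp [pvSpec, hnone]
termination_by cs.length - index

-- B computes pvSpec
theorem pv_alt_spec (astring : String) : first_vowel_index_alt astring = pvSpec astring.toList := by
  set cs := astring.toList with hcs
  unfold first_vowel_index_alt
  set positions :=
    ((['a', 'e', 'i', 'o', 'u'].map (fun v => PySem.Chars.find cs [v])).filter
      (fun p => p ≠ -1)) with hpos
  cases hidx : cs.findIdx? pvIsVowelA with
  | none =>
    have hnil : positions = [] := by
      rw [hpos, List.filter_eq_nil_iff]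
      intro p hp
      simp only [List.mem_map] at hp
      obtain ⟨v, hv, rfl⟩ := hp
      have hnotin : v ∉ cs := fun hvc => by
        have h1 := (List.findIdx?_eq_none_iff).mp hidx v hvc
        have h2 := (pv_vowel_mem v).mpr hv
        rw [h1] at h2
        exact Bool.noConfusion h2
      rw [pv_find_absent cs v hnotin]
      simp
    simp [hnil, pvSpec, hidx]
  | some k =>
    obtain ⟨hk, hvk, hmin⟩ := List.findIdx?_eq_some_iff_getElem.mp hidx
    have hge : ∀ p ∈ positions, (k : Int) ≤ p := by
      intro p hp
      rw [hpos, List.mem_filter] at hp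
      obtain ⟨hp1, hp2⟩ := hp
      simp only [List.mem_map] at hp1
      obtain ⟨v, hv, rfl⟩ := hp1
      have hne : PySem.Chars.find cs [v] ≠ -1 := by simpa using hp2
      have hinf : [v] <:+: cs := (PySem.Chars.find_ne_neg_one_iff cs [v]).mp hne
      have h0 : 0 ≤ PySem.Chars.find cs [v] := (PySem.Chars.find_nonneg_iff cs [v]).mpr hinf
      obtain ⟨hpre, _⟩ := PySem.Chars.find_spec h0
      rw [pv_singleton_prefix, List.head?_drop] at hpre
      by_contra hlt
      push Not at hlt
      have hplt : (PySem.Chars.find cs [v]).toNat < k := by omega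
      have hplen : (PySem.Chars.find cs [v]).toNat < cs.length := by
        by_contra hbig
        rw [List.getElem?_eq_none (by omega)] at hpre
        simp at hpre
      rw [List.getElem?_eq_getElem hplen] at hpre
      injection hpre with hpre'
      exact hmin _ hplt (by rw [hpre']; exact (pv_vowel_mem v).mpr hv)
    have hv0mem : cs[k] ∈ ['a', 'e', 'i', 'o', 'u'] := (pv_vowel_mem cs[k]).mp hvk
    have hfk : PySem.Chars.find cs [cs[k]] = (k : Int) := by
      apply pv_find_single cs cs[k] k (by simp [hk])
      intro j hj hc
      have hjl : j < cs.length := by omega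
      rw [List.getElem?_eq_getElem hjl] at hc
      injection hc with hc'
      exact absurd (hmin j hj) (by simp [hc', hvk])
    have hkmem : (k : Int) ∈ positions := by
      rw [hpos, List.mem_filter]
      refine ⟨List.mem_map.mpr ⟨cs[k], hv0mem, hfk⟩, ?_⟩
      simp
    have hne : positions ≠ [] := fun hn => by rw [hn] at hkmem; exact List.not_mem_nil hkmem
    rw [if_neg hne]
    cases hm : PySem.List.min? positions (fun x => x) with
    | none => exact absurd ((PySem.List.min?_eq_none_iff positions _).mp hm) hne
    | some m =>
      have hmm : m ∈ positions := PySem.List.min?_mem hm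
      have h1 : m ≤ (k : Int) := PySem.List.min?_isMin hm _ hkmem
      have h2 : (k : Int) ≤ m := hge m hmm
      have hmk : m = (k : Int) := le_antisymm h1 h2
      simp [pvSpec, hidx, hmk]

-- ===== VERDICT (by name: the statement is the Claim_ definition above) =====
theorem first_vowel_index_spec : Claim_equal_first_vowel_index := by
  intro astring _
  unfold Spec_first_vowel_index first_vowel_index
  rw [pv_alt_spec, pv_loopA_spec astring.toList 0 (by intro j hj; omega)]
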